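-- pv_equiv track=rewrite | github.com/alirodhi123/odoo-project | lpj_accounting/models/account_payment.py | _convert_nn
-- ===== SOURCE A (Python) =====
-- dic = {
--     'to_19': ('Zero', 'One', 'Two', 'Three', 'Four', 'Five', 'Six', 'Seven', 'Eight', 'Nine', 'Ten', 'Eleven', 'Twelve',
--               'Thirteen', 'Fourteen', 'Fifteen', 'Sixteen', 'Seventeen', 'Eighteen', 'Nineteen'),
--     'tens': ('Twenty', 'Thirty', 'Forty', 'Fifty', 'Sixty', 'Seventy', 'Eighty', 'Ninety'),
--     'denom': ('', 'Thousand', 'Million', 'Billion', 'Trillion', 'Quadrillion', 'Quintillion'),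
--     'to_19_id': (
--     'Nol', 'Satu', 'Dua', 'Tiga', 'Empat', 'Lima', 'Enam', 'Tujuh', 'Delapan', 'Sembilan', 'Sepuluh', 'Sebelas',
--     'Dua Belas', 'Tiga Belas', 'Empat Belas', 'Lima Belas', 'Enam Belas', 'Tujuh Belas', 'Delapan Belas',
--     'Sembilan Belas'),
--     'tens_id': ('Dua Puluh', 'Tiga Puluh', 'Empat Puluh', 'Lima Puluh', 'Enam Puluh', 'Tujuh Puluh', 'Delapan Puluh',
--                 'Sembilan Puluh'),
--     'denom_id': ('', 'Ribu', 'Juta', 'Miliar', 'Triliun', 'Biliun')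
-- }
--
-- def _convert_nn(val, bhs):
--     tens = dic['tens_id']
--     to_19 = dic['to_19_id']
--     if bhs == 'en':
--         tens = dic['tens']
--         to_19 = dic['to_19']
--     if val < 20:
--         return to_19[val]
--     for (dcap, dval) in ((k, 20 + (10 * v)) for (v, k) in enumerate(tens)):
--         if dval + 10 > val:
--             if val % 10:
--                 return dcap + ' ' + to_19[val % 10]
--             return dcap
-- ===== SOURCE B (Python) =====
-- dic = {
--     'to_19': ('Zero', 'One', 'Two', 'Three', 'Four', 'Five', 'Six', 'Seven', 'Eight', 'Nine', 'Ten', 'Eleven', 'Twelve',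
--               'Thirteen', 'Fourteen', 'Fifteen', 'Sixteen', 'Seventeen', 'Eighteen', 'Nineteen'),
--     'tens': ('Twenty', 'Thirty', 'Forty', 'Fifty', 'Sixty', 'Seventy', 'Eighty', 'Ninety'),
--     'denom': ('', 'Thousand', 'Million', 'Billion', 'Trillion', 'Quadrillion', 'Quintillion'),
--     'to_19_id': (
--     'Nol', 'Satu', 'Dua', 'Tiga', 'Empat', 'Lima', 'Enam', 'Tujuh', 'Delapan', 'Sembilan', 'Sepuluh', 'Sebelas',
--     'Dua Belas', 'Tiga Belas', 'Empat Belas', 'Lima Belas', 'Enam Belas', 'Tujuh Belas', 'Delapan Belas',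
--     'Sembilan Belas'),
--     'tens_id': ('Dua Puluh', 'Tiga Puluh', 'Empat Puluh', 'Lima Puluh', 'Enam Puluh', 'Tujuh Puluh', 'Delapan Puluh',
--                 'Sembilan Puluh'),
--     'denom_id': ('', 'Ribu', 'Juta', 'Miliar', 'Triliun', 'Biliun')
-- }
--
-- def _convert_nn(val, bhs):
--     tens = dic['tens_id']
--     to_19 = dic['to_19_id']
--     if bhs == 'en':
--         tens = dic['tens']
--         to_19 = dic['to_19']
--     if val < 20:
--         return to_19[val]
--     if val < 100:
--         base = tens[val // 10 - 2]
--         r = val % 10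
--         return base + ' ' + to_19[r] if r else base
--     # val >= 100: fall off the end (None), as in the original
-- ===== Notes on version B (the rewrite author's own statement) =====
-- stated objective: simpler
-- what changed: The linear scan over the tens table (enumerate + threshold test per bucket) is replaced by a closed-form arithmetic index tens[val // 10 - 2], guarded by val < 100.
-- outside the precondition, e.g. on _convert_nn(100, 'en'): A returns None, B returns None
import Mathlib
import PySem

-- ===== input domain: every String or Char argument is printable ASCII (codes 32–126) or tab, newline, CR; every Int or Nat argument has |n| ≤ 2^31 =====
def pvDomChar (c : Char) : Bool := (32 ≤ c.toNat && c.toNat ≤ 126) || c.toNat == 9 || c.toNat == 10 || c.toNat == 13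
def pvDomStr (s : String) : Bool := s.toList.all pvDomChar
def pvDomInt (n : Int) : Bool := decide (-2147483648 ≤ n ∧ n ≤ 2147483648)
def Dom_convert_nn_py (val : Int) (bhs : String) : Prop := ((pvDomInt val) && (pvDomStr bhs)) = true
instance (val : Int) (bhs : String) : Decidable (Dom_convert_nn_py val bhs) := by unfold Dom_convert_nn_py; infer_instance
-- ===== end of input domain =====

-- B replaces A's linear scan of the tens table by a direct arithmetic index (val // 10 - 2); simpler, same values.

-- ===== PORT A =====
def dicTo19 : List String := ["Zero", "One", "Two", "Three", "Four", "Five", "Six", "Seven", "Eight", "Nine", "Ten",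
  "Eleven", "Twelve", "Thirteen", "Fourteen", "Fifteen", "Sixteen", "Seventeen", "Eighteen", "Nineteen"]
def dicTens : List String := ["Twenty", "Thirty", "Forty", "Fifty", "Sixty", "Seventy", "Eighty", "Ninety"]
def dicTo19Id : List String := ["Nol", "Satu", "Dua", "Tiga", "Empat", "Lima", "Enam", "Tujuh", "Delapan", "Sembilan",
  "Sepuluh", "Sebelas", "Dua Belas", "Tiga Belas", "Empat Belas", "Lima Belas", "Enam Belas", "Tujuh Belas",
  "Delapan Belas", "Sembilan Belas"]
def dicTensId : List String := ["Dua Puluh", "Tiga Puluh", "Empat Puluh", "Lima Puluh", "Enam Puluh", "Tujuh Puluh",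
  "Delapan Puluh", "Sembilan Puluh"]

-- A's for-loop over `enumerate(tens)` with `dval = 20 + 10*v`; the exhausted loop (Python's None) is "" — excluded by Pre_.
def convertLoopA (tens to_19 : List String) (val : Int) (v : Nat) : String :=
  match tens with
  | [] => ""
  | dcap :: rest =>
      if (20 + 10 * (v : Int)) + 10 > val then
        if PySem.Int.mod val 10 ≠ 0 then
          dcap ++ " " ++ (PySem.List.pyGet? to_19 (PySem.Int.mod val 10)).getD ""
        else dcap
      else convertLoopA rest to_19 val (v + 1)

def convert_nn_py (val : Int) (bhs : String) : String :=
  let tens := if bhs == "en" then dicTens else dicTensId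
  let to_19 := if bhs == "en" then dicTo19 else dicTo19Id
  if val < 20 then (PySem.List.pyGet? to_19 val).getD ""   -- negative index wraps; out of range (val < -20) raises — excluded by Pre_
  else convertLoopA tens to_19 val 0

-- ===== PORT B =====
def convert_nn_py_alt (val : Int) (bhs : String) : String :=
  let tens := if bhs == "en" then dicTens else dicTensId
  let to_19 := if bhs == "en" then dicTo19 else dicTo19Id
  if val < 20 then (PySem.List.pyGet? to_19 val).getD ""
  else if val < 100 then
    let base := (PySem.List.pyGet? tens (PySem.Int.floordiv val 10 - 2)).getD ""
    let r := PySem.Int.mod val 10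
    if r ≠ 0 then base ++ " " ++ (PySem.List.pyGet? to_19 r).getD "" else base
  else ""   -- B also falls off the end (Python's None) — excluded by Pre_

-- ===== PRECONDITION & SPEC =====
-- Pre_ excludes val < -20 (A raises IndexError on the negative to_19 index) and val ≥ 100 (A's loop is
-- exhausted and the function returns None, which is not a String value; B returns None there too).
def Pre_convert_nn_py (val : Int) (bhs : String) : Prop := -20 ≤ val ∧ val < 100
instance (val : Int) (bhs : String) : Decidable (Pre_convert_nn_py val bhs) := by unfold Pre_convert_nn_py; infer_instance
def pvWitness_convert_nn_py : Int × String := (21, "en")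

def Spec_convert_nn_py (val : Int) (bhs : String) (out : String) : Prop := out = convert_nn_py_alt val bhs
instance (val : Int) (bhs : String) (out : String) : Decidable (Spec_convert_nn_py val bhs out) := by unfold Spec_convert_nn_py; infer_instance

-- ===== CLAIM (what is proved, stated in full; the proofs are below) =====
def Claim_equal_convert_nn_py : Prop := ∀ (val : Int) (bhs : String), Dom_convert_nn_py val bhs → Pre_convert_nn_py val bhs → Spec_convert_nn_py val bhs (convert_nn_py val bhs)

-- ===== LEMMAS AND PROOFS =====
-- For fixed tables the two bodies agree on every val in [-20, 100): both ports depend on bhs only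
-- through the boolean (bhs == "en"), so two instances of this lemma close the claim.
lemma core_eq_en (val : Int) (h1 : -20 ≤ val) (h2 : val < 100) :
    convert_nn_py val "en" = convert_nn_py_alt val "en" := by
  interval_cases val <;> rfl

lemma core_eq_id (bhs : String) (hb : (bhs == "en") = false) (val : Int) (h1 : -20 ≤ val) (h2 : val < 100) :
    convert_nn_py val bhs = convert_nn_py_alt val bhs := by
  unfold convert_nn_py convert_nn_py_alt
  rw [hb]
  simp only [Bool.false_eq_true, if_false]
  interval_cases val <;> rfl

-- ===== VERDICT (by name: the statement is the Claim_ definition above) =====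
theorem convert_nn_py_spec : Claim_equal_convert_nn_py := by
  intro val bhs _ hpre
  unfold Spec_convert_nn_py
  by_cases hb : (bhs == "en") = true
  · rw [beq_iff_eq] at hb
    subst hb
    exact core_eq_en val hpre.1 hpre.2
  · exact core_eq_id bhs (by simpa using hb) val hpre.1 hpre.2
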